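-- pv_equiv track=rewrite | github.com/wpognonec/PY110 | small_problems/easy_1/11.py | signed_integer_to_string
-- ===== SOURCE A (Python) =====
-- def signed_integer_to_string(n: int):
--     digits = "0123456789"
--     num = abs(n)
--     num_str = ""
--     while num:
--         num_str += digits[num%10]
--         num = num // 10
--     if n > 0:
--         num_str += "+"
--     elif n < 0:
--         num_str += "-"
--     return num_str[::-1] or '0'
-- ===== SOURCE B (Python) =====
-- def signed_integer_to_string(n: int):
--     if n > 0:
--         return "+" + str(n)
--     if n < 0:
--         return "-" + str(-n)
--     return "0"
-- ===== Notes on version B (the rewrite author's own statement) =====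
-- stated objective: idiomatic
-- what changed: Replaced the manual digit-extraction loop (mod/floordiv, building the string LSB-first and reversing) with a direct sign branch that delegates digit rendering to the built-in str() on the magnitude.
import Mathlib
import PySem

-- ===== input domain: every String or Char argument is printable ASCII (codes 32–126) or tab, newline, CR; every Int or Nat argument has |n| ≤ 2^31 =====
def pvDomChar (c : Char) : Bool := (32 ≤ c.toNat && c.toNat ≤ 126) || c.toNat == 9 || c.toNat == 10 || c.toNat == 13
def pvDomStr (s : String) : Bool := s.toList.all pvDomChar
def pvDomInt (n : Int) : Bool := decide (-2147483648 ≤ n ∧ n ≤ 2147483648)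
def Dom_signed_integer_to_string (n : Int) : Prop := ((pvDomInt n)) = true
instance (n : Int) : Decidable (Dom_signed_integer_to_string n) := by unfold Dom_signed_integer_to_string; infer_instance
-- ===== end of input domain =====

-- B replaces A's manual mod/floordiv digit loop (built LSB-first, then reversed) with a plain
-- sign branch that renders digits via the built-in str() on the magnitude (idiomatic, same cost).


-- ===== PORT A =====
-- the while loop: num_str is the accumulator (as List Char), digits[num % 10] is always in
-- range (num % 10 < 10), so the list lookup uses getD with an irrelevant default
def pvALoop (num : Nat) (numStr : List Char) : List Char :=
  if _h : num = 0 then numStr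
  else pvALoop (num / 10) (numStr ++ [("0123456789".toList).getD (num % 10) ' '])
decreasing_by exact Nat.div_lt_self (Nat.pos_of_ne_zero _h) (by omega)

def signed_integer_to_string (n : Int) : String :=
  let num := n.natAbs              -- abs(n); nonnegative, so Nat mod/div match Python's
  let numStr := pvALoop num []
  let numStr2 := if n > 0 then numStr ++ ['+'] else if n < 0 then numStr ++ ['-'] else numStr
  let r := numStr2.reverse         -- num_str[::-1]
  String.ofList (if r = [] then ['0'] else r)   -- `or '0'`: empty string is falsy

-- ===== PORT B =====
def signed_integer_to_string_alt (n : Int) : String :=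
  if n > 0 then "+" ++ PySem.Int.toStr n
  else if n < 0 then "-" ++ PySem.Int.toStr (-n)
  else "0"

-- ===== PRECONDITION & SPEC =====
def Spec_signed_integer_to_string (n : Int) (out : String) : Prop := out = signed_integer_to_string_alt n
instance (n : Int) (out : String) : Decidable (Spec_signed_integer_to_string n out) := by unfold Spec_signed_integer_to_string; infer_instance

-- ===== CLAIM (what is proved, stated in full; the proofs are below) =====
def Claim_equal_signed_integer_to_string : Prop := ∀ (n : Int), Dom_signed_integer_to_string n → Spec_signed_integer_to_string n (signed_integer_to_string n)

-- ===== LEMMAS AND PROOFS =====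
theorem pv_digit_eq (d : Nat) (h : d < 10) :
    ("0123456789".toList).getD d ' ' = Nat.digitChar d := by
  interval_cases d <;> rfl

theorem pvALoop_reverse (fuel : Nat) : ∀ (n : Nat) (acc : List Char), 0 < n → n ≤ fuel →
    (pvALoop n acc).reverse = Nat.toDigitsCore 10 fuel n acc.reverse := by
  induction fuel with
  | zero => intro n acc h1 h2; omega
  | succ fuel ih =>
    intro n acc h1 h2
    rw [pvALoop]
    simp only [Nat.pos_iff_ne_zero] at h1
    rw [dif_neg h1, Nat.toDigitsCore]
    have hd : n % 10 < 10 := Nat.mod_lt _ (by omega)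
    by_cases h0 : n / 10 = 0
    · rw [if_pos h0, pvALoop, dif_pos h0, pv_digit_eq _ hd]
      simp
    · rw [if_neg h0]
      have hlt : n / 10 < n := Nat.div_lt_self (Nat.pos_of_ne_zero h1) (by omega)
      rw [ih (n / 10) _ (Nat.pos_of_ne_zero h0) (by omega), pv_digit_eq _ hd]
      simp

theorem pvALoop_toDigits (n : Nat) (h : 0 < n) :
    (pvALoop n []).reverse = Nat.toDigits 10 n := by
  rw [Nat.toDigits]
  exact pvALoop_reverse (n + 1) n [] h (by omega)

theorem pv_ofList_append (l1 l2 : List Char) :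
    String.ofList (l1 ++ l2) = String.ofList l1 ++ String.ofList l2 := by
  apply String.toList_injective
  simp

-- ===== VERDICT (by name: the statement is the Claim_ definition above) =====
theorem signed_integer_to_string_spec : Claim_equal_signed_integer_to_string := by
  intro n _
  unfold Spec_signed_integer_to_string signed_integer_to_string signed_integer_to_string_alt
  rcases lt_trichotomy n 0 with hn | hn | hn
  · have h1 : ¬ n > 0 := by omega
    have hpos : 0 < n.natAbs := by omega
    simp only [if_neg h1, if_pos hn]
    rw [show (pvALoop n.natAbs [] ++ ['-']).reverse
          = '-' :: (pvALoop n.natAbs []).reverse by simp,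
        pvALoop_toDigits _ hpos]
    rw [if_neg (by simp)]
    have : PySem.Int.toStr (-n) = String.ofList (Nat.toDigits 10 n.natAbs) := by
      unfold PySem.Int.toStr PySem.Int.toChars
      rw [if_neg (by omega), show (-n).toNat = n.natAbs by omega]
    rw [this, show ('-' :: Nat.toDigits 10 n.natAbs)
          = ['-'] ++ Nat.toDigits 10 n.natAbs from rfl, pv_ofList_append]
  · subst hn
    have h0 : pvALoop 0 [] = [] := by rw [pvALoop]; simp
    simp [h0]
  · have hpos : 0 < n.natAbs := by omega
    simp only [if_pos hn]
    rw [show (pvALoop n.natAbs [] ++ ['+']).reverse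
          = '+' :: (pvALoop n.natAbs []).reverse by simp,
        pvALoop_toDigits _ hpos]
    rw [if_neg (by simp)]
    have : PySem.Int.toStr n = String.ofList (Nat.toDigits 10 n.natAbs) := by
      unfold PySem.Int.toStr PySem.Int.toChars
      rw [if_neg (by omega), show n.toNat = n.natAbs by omega]
    rw [this, show ('+' :: Nat.toDigits 10 n.natAbs)
          = ['+'] ++ Nat.toDigits 10 n.natAbs from rfl, pv_ofList_append]
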